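-- pv_equiv track=rewrite | github.com/GauzStudio/aula-emanuel | teste.py | geraLinha
-- ===== SOURCE A (Python) =====
-- def geraLinha(comprimento, dicionario, valorBase = '.'):
--     linha = []
--     for numero in range(comprimento):
--         try:
--             valor = dicionario[str(numero)]
--         except(KeyError):
--             valor = valorBase
--         linha.append(valor)
--     return linha
-- ===== SOURCE B (Python) =====
-- def geraLinha(comprimento, dicionario, valorBase = '.'):
--     linha = [valorBase] * comprimento
--     indice = {str(i): i for i in range(comprimento)}
--     for chave, valor in dicionario.items():
--         i = indice.get(chave)
--         if i is not None:
--             linha[i] = valor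
--     return linha
-- ===== Notes on version B (the rewrite author's own statement) =====
-- stated objective: alternative
-- what changed: Gather loop over range(comprimento) with try/except lookups is replaced by a prefilled [valorBase]*comprimento list, a precomputed canonical str(i)->i index map, and a scatter loop over the dictionary's own entries.
import Mathlib
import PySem

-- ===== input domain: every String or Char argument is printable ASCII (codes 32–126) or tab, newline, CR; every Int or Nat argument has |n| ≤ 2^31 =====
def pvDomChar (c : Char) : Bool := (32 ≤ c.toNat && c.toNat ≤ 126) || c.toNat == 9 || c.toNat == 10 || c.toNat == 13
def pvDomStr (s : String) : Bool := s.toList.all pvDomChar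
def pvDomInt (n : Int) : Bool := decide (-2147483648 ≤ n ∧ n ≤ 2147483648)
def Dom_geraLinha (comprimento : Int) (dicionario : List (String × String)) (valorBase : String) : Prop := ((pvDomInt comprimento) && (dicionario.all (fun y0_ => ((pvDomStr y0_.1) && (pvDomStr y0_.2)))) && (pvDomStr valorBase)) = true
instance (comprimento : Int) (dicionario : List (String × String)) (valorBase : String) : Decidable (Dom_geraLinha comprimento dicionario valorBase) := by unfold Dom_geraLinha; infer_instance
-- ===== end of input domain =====

-- B replaces A's range-driven gather (a lookup with try/except per index) by a prefilled line,
-- a precomputed canonical str(i) -> i index dict, and a dict-driven scatter loop (alternative decomposition).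

-- ===== PORT A =====
def geraLinha (comprimento : Int) (dicionario : List (String × String)) (valorBase : String) : List String :=
  (PySem.List.pyRange 0 comprimento 1).foldl
    (fun linha numero =>
      let valor :=
        match (PySem.Dict.ofList dicionario).get? (PySem.Int.toStr numero) with
        | some w => w
        | none => valorBase
      linha ++ [valor]) []

-- ===== PORT B =====
def geraLinha_alt (comprimento : Int) (dicionario : List (String × String)) (valorBase : String) : List String :=
  let linha0 := List.replicate comprimento.toNat valorBase
  let indice := (PySem.List.pyRange 0 comprimento 1).foldl
    (fun idx i => idx.insert (PySem.Int.toStr i) i) (PySem.Dict.empty : PySem.Dict String Int)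
  ((PySem.Dict.ofList dicionario).items).foldl
    (fun linha kv =>
      match indice.get? kv.1 with
      | some i => PySem.List.pySetD linha i kv.2
      | none => linha) linha0

-- ===== PRECONDITION & SPEC =====
def Spec_geraLinha (comprimento : Int) (dicionario : List (String × String)) (valorBase : String) (out : List String) : Prop := out = geraLinha_alt comprimento dicionario valorBase
instance (comprimento : Int) (dicionario : List (String × String)) (valorBase : String) (out : List String) : Decidable (Spec_geraLinha comprimento dicionario valorBase out) := by unfold Spec_geraLinha; infer_instance

-- ===== CLAIM (what is proved, stated in full; the proofs are below) =====
def Claim_equal_geraLinha : Prop := ∀ (comprimento : Int) (dicionario : List (String × String)) (valorBase : String), Dom_geraLinha comprimento dicionario valorBase → Spec_geraLinha comprimento dicionario valorBase (geraLinha comprimento dicionario valorBase)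

-- ===== LEMMAS AND PROOFS =====

theorem toDigitsCore_eq (f : Nat) : ∀ (n : Nat) (acc : List Char), n < f →
    Nat.toDigitsCore 10 f n acc
      = (if n = 0 then ['0'] else (Nat.digits 10 n).reverse.map Nat.digitChar) ++ acc := by
  induction f with
  | zero => intro n acc h; omega
  | succ f ih =>
    intro n acc h
    rw [Nat.toDigitsCore]
    by_cases hd : n / 10 = 0
    · simp only [hd]
      by_cases h0 : n = 0
      · subst h0; simp [Nat.digitChar]
      · have hlt : n < 10 := by omega
        rw [if_pos trivial, if_neg h0]
        rw [Nat.digits_def' (by norm_num) (Nat.pos_of_ne_zero h0), Nat.div_eq_of_lt hlt]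
        simp [Nat.mod_eq_of_lt hlt]
    · rw [if_neg hd]
      have h1 : n / 10 < f := by
        have := Nat.div_lt_self (by omega : 0 < n) (by norm_num : 1 < 10)
        omega
      rw [ih (n / 10) _ h1, if_neg hd]
      have h0 : n ≠ 0 := by omega
      rw [if_neg h0, Nat.digits_def' (by norm_num) (Nat.pos_of_ne_zero h0)]
      simp

theorem digitChar_inj_lt : ∀ x < 10, ∀ y < 10, Nat.digitChar x = Nat.digitChar y → x = y := by decide

theorem map_digitChar_inj : ∀ (l1 l2 : List Nat), (∀ x ∈ l1, x < 10) → (∀ x ∈ l2, x < 10) →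
    l1.map Nat.digitChar = l2.map Nat.digitChar → l1 = l2 := by
  intro l1
  induction l1 with
  | nil => intro l2 _ _ h; cases l2 <;> simp_all
  | cons x t ih =>
    intro l2 h1 h2 h
    cases l2 with
    | nil => simp_all
    | cons y t2 =>
      simp only [List.map_cons, List.cons.injEq] at h
      have hx := digitChar_inj_lt x (h1 x (by simp)) y (h2 y (by simp)) h.1
      subst hx
      rw [ih t2 (fun z hz => h1 z (by simp [hz])) (fun z hz => h2 z (by simp [hz])) h.2]

theorem rep_inj (a b : Nat)
    (h : (if a = 0 then ['0'] else (Nat.digits 10 a).reverse.map Nat.digitChar)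
       = (if b = 0 then ['0'] else (Nat.digits 10 b).reverse.map Nat.digitChar)) : a = b := by
  have key : ∀ n : Nat, n ≠ 0 → (Nat.digits 10 n).reverse.map Nat.digitChar = ['0'] → False := by
    intro n hn hrep
    have hlen : (Nat.digits 10 n).length = 1 := by
      have := congrArg List.length hrep
      simpa using this
    obtain ⟨d, hd⟩ : ∃ d, Nat.digits 10 n = [d] := by
      cases hdig : Nat.digits 10 n with
      | nil => simp [hdig] at hlen
      | cons d t => cases t with
        | nil => exact ⟨d, rfl⟩
        | cons e t2 => simp [hdig] at hlen
    rw [hd] at hrep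
    simp only [List.reverse_cons, List.reverse_nil, List.nil_append, List.map_cons, List.map_nil,
      List.cons.injEq, and_true] at hrep
    have hd10 : d < 10 := Nat.digits_lt_base (by norm_num) (show d ∈ Nat.digits 10 n by simp [hd])
    have : d = 0 := digitChar_inj_lt d hd10 0 (by norm_num) (by simpa [Nat.digitChar] using hrep)
    have hb := Nat.ofDigits_digits 10 n
    rw [hd, this] at hb
    simp [Nat.ofDigits] at hb
    omega
  by_cases ha : a = 0 <;> by_cases hb : b = 0
  · omega
  · exact absurd (by simpa [ha, hb] using h.symm) (fun hh => key b hb hh)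
  · exact absurd (by simpa [ha, hb] using h) (fun hh => key a ha hh)
  · rw [if_neg ha, if_neg hb] at h
    have h' : (Nat.digits 10 a).reverse = (Nat.digits 10 b).reverse :=
      map_digitChar_inj _ _ (fun x hx => Nat.digits_lt_base (by norm_num) (List.mem_reverse.mp hx))
        (fun x hx => Nat.digits_lt_base (by norm_num) (List.mem_reverse.mp hx)) h
    have hdig : Nat.digits 10 a = Nat.digits 10 b := List.reverse_inj.mp h'
    have := Nat.ofDigits_digits 10 a
    rw [hdig, Nat.ofDigits_digits] at this
    omega

theorem toStr_nat_inj (a b : Nat) (h : PySem.Int.toStr (a : Int) = PySem.Int.toStr (b : Int)) : a = b := by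
  have hch : PySem.Int.toChars (a : Int) = PySem.Int.toChars (b : Int) := by
    have := congrArg String.toList h
    simpa [PySem.Int.toList_toStr] using this
  simp only [PySem.Int.toChars] at hch
  rw [if_neg (by omega), if_neg (by omega)] at hch
  simp only [Int.toNat_natCast] at hch
  unfold Nat.toDigits at hch
  rw [toDigitsCore_eq _ _ _ (by omega), toDigitsCore_eq _ _ _ (by omega)] at hch
  simp only [List.append_nil] at hch
  exact rep_inj a b hch

def pvLookLast (l : List (String × String)) (k : String) : Option String :=
  l.foldl (fun acc kv => if kv.1 = k then some kv.2 else acc) none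

theorem pvFoldl_opt (l : List (String × String)) (k : String) : ∀ (init : Option String),
    l.foldl (fun acc kv => if kv.1 = k then some kv.2 else acc) init
      = match l.foldl (fun acc kv => if kv.1 = k then some kv.2 else acc) none with
        | some w => some w
        | none => init := by
  induction l with
  | nil => intro init; rfl
  | cons kv l ih =>
    intro init
    simp only [List.foldl_cons]
    rw [ih, ih (if kv.1 = k then some kv.2 else none)]
    by_cases h : kv.1 = k <;> simp [h] <;> cases l.foldl (fun acc kv => if kv.1 = k then some kv.2 else acc) none <;> rfl

theorem pvLookLast_cons (kv : String × String) (l : List (String × String)) (k : String) :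
    pvLookLast (kv :: l) k
      = match pvLookLast l k with
        | some w => some w
        | none => if kv.1 = k then some kv.2 else none := by
  unfold pvLookLast
  simp only [List.foldl_cons]
  exact pvFoldl_opt l k _

theorem lookLast_none_of_not_mem (k : String) : ∀ (l : List (String × String)),
    k ∉ l.map Prod.fst → pvLookLast l k = none := by
  intro l
  induction l with
  | nil => intro _; rfl
  | cons kv l ih =>
    intro h
    simp only [List.map_cons, List.mem_cons] at h
    push Not at h
    rw [pvLookLast_cons, ih h.2]
    simp only [if_neg (fun e : kv.1 = k => h.1 e.symm)]

theorem lookLast_eq_get?_mk (k : String) : ∀ (l : List (String × String)),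
    (l.map Prod.fst).Nodup → pvLookLast l k = (PySem.Dict.mk l).get? k := by
  intro l
  induction l with
  | nil => intro _; rfl
  | cons kv l ih =>
    intro hnd
    simp only [List.map_cons, List.nodup_cons] at hnd
    rw [pvLookLast_cons, PySem.Dict.get?_mk_cons]
    by_cases h : kv.1 = k
    · rw [lookLast_none_of_not_mem k l (h ▸ hnd.1)]
      simp [h]
    · rw [ih hnd.2]
      have hb : (kv.1 == k) = false := by simp [h]
      cases (PySem.Dict.mk l : PySem.Dict String String).get? k <;> simp [hb, h]

def pvIdx (c : Int) : PySem.Dict String Int :=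
  (PySem.List.pyRange 0 c 1).foldl (fun idx i => idx.insert (PySem.Int.toStr i) i) PySem.Dict.empty

def pvF (m : Nat) : PySem.Dict String Int :=
  (List.range m).foldl (fun idx (j : Nat) => idx.insert (PySem.Int.toStr (j : Int)) (j : Int)) PySem.Dict.empty

theorem pvIdx_eq (c : Int) : pvIdx c = pvF c.toNat := by
  rw [pvIdx, pvF, PySem.List.pyRange_zero, List.foldl_map]

theorem pvF_get_toStr (m : Nat) : ∀ j : Nat, j < m → (pvF m).get? (PySem.Int.toStr (j : Int)) = some (j : Int) := by
  induction m with
  | zero => intro j hj; omega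
  | succ m ih =>
    intro j hj
    rw [pvF, List.range_succ, List.foldl_append]
    simp only [List.foldl_cons, List.foldl_nil]
    rw [show (List.range m).foldl (fun idx (j : Nat) => idx.insert (PySem.Int.toStr (j : Int)) (j : Int)) PySem.Dict.empty = pvF m from rfl]
    rw [PySem.Dict.get?_insert]
    by_cases h : j = m
    · simp [h]
    · rw [if_neg (fun e => h (toStr_nat_inj j m e)), ih j (by omega)]

theorem pvF_get_inv (m : Nat) : ∀ (k : String) (i : Int), (pvF m).get? k = some i →
    ∃ j : Nat, j < m ∧ k = PySem.Int.toStr (j : Int) ∧ i = (j : Int) := by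
  induction m with
  | zero =>
    intro k i h
    rw [pvF] at h
    simp [PySem.Dict.get?_empty] at h
  | succ m ih =>
    intro k i h
    rw [pvF, List.range_succ, List.foldl_append] at h
    simp only [List.foldl_cons, List.foldl_nil] at h
    rw [show (List.range m).foldl (fun idx (j : Nat) => idx.insert (PySem.Int.toStr (j : Int)) (j : Int)) PySem.Dict.empty = pvF m from rfl] at h
    rw [PySem.Dict.get?_insert] at h
    by_cases hk : k = PySem.Int.toStr (m : Int)
    · rw [if_pos hk] at h
      exact ⟨m, by omega, hk, (Option.some_inj.mp h).symm⟩
    · rw [if_neg hk] at h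
      obtain ⟨j, hj, rfl, rfl⟩ := ih k i h
      exact ⟨j, by omega, rfl, rfl⟩

theorem pvScatter (c : Int) (l : List (String × String)) : ∀ linha : List String, linha.length = c.toNat →
    ((l.foldl (fun linha kv =>
        match (pvIdx c).get? kv.1 with
        | some i => PySem.List.pySetD linha i kv.2
        | none => linha) linha).length = c.toNat) ∧
    (∀ j : Nat, j < c.toNat →
      (l.foldl (fun linha kv =>
        match (pvIdx c).get? kv.1 with
        | some i => PySem.List.pySetD linha i kv.2
        | none => linha) linha)[j]?
        = match pvLookLast l (PySem.Int.toStr (j : Int)) with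
          | some w => some w
          | none => linha[j]?) := by
  induction l with
  | nil =>
    intro linha hlen
    refine ⟨hlen, fun j hj => ?_⟩
    simp [pvLookLast]
  | cons kv l ih =>
    intro linha hlen
    simp only [List.foldl_cons]
    have hstep : ∀ j : Nat, j < c.toNat →
        (match (pvIdx c).get? kv.1 with
         | some i => PySem.List.pySetD linha i kv.2
         | none => linha)[j]?
        = if kv.1 = PySem.Int.toStr (j : Int) then some kv.2 else linha[j]? := by
      intro j hj
      cases hg : (pvIdx c).get? kv.1 with
      | none =>
        have hne : kv.1 ≠ PySem.Int.toStr (j : Int) := by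
          intro e
          rw [e, pvIdx_eq, pvF_get_toStr c.toNat j hj] at hg
          simp at hg
        simp [hne]
      | some i =>
        rw [pvIdx_eq] at hg
        obtain ⟨j', hj', hk, rfl⟩ := pvF_get_inv c.toNat kv.1 i hg
        show (PySem.List.pySetD linha ((j' : Nat) : Int) kv.2)[j]? = _
        rw [PySem.List.pySetD_natCast, List.getElem?_set]
        by_cases h : j = j'
        · subst h
          rw [if_pos rfl, if_pos (by omega : j < linha.length), if_pos hk]
        · rw [if_neg (fun e => h e.symm), if_neg (by
            rw [hk]; exact fun e => h (toStr_nat_inj j j' e.symm))]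
    have hlen' : (match (pvIdx c).get? kv.1 with
         | some i => PySem.List.pySetD linha i kv.2
         | none => linha).length = c.toNat := by
      cases hg : (pvIdx c).get? kv.1 with
      | none => exact hlen
      | some i =>
        rw [pvIdx_eq] at hg
        obtain ⟨j', hj', hk, rfl⟩ := pvF_get_inv c.toNat kv.1 i hg
        show (PySem.List.pySetD linha ((j' : Nat) : Int) kv.2).length = c.toNat
        rw [PySem.List.pySetD_natCast, List.length_set]
        exact hlen
    obtain ⟨ihlen, ihget⟩ := ih _ hlen'
    refine ⟨ihlen, fun j hj => ?_⟩
    rw [ihget j hj, pvLookLast_cons, hstep j hj]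
    cases pvLookLast l (PySem.Int.toStr (j : Int)) with
    | some w => rfl
    | none =>
      by_cases h : kv.1 = PySem.Int.toStr (j : Int) <;> simp [h]

theorem geraLinha_eq_alt (comprimento : Int) (dicionario : List (String × String)) (valorBase : String) :
    geraLinha comprimento dicionario valorBase = geraLinha_alt comprimento dicionario valorBase := by
  have hA : geraLinha comprimento dicionario valorBase
      = (List.range comprimento.toNat).map (fun (j : Nat) =>
          match (PySem.Dict.ofList dicionario).get? (PySem.Int.toStr (j : Int)) with
          | some w => w
          | none => valorBase) := by
    rw [geraLinha, PySem.List.foldl_append_singleton_eq_map, PySem.List.pyRange_zero, List.map_map]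
    rfl
  have hlook : ∀ k, pvLookLast (PySem.Dict.ofList dicionario).items k
      = (PySem.Dict.ofList dicionario).get? k := by
    intro k
    have hnd := PySem.Dict.nodup_keys_ofList (ps := dicionario)
    rw [lookLast_eq_get?_mk k _ hnd]
  obtain ⟨hlen, hget⟩ := pvScatter comprimento ((PySem.Dict.ofList dicionario).items)
    (List.replicate comprimento.toNat valorBase) (by simp)
  apply List.ext_getElem?
  intro j
  by_cases hj : j < comprimento.toNat
  · rw [hA]
    rw [show geraLinha_alt comprimento dicionario valorBase
        = ((PySem.Dict.ofList dicionario).items).foldl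
            (fun linha kv =>
              match (pvIdx comprimento).get? kv.1 with
              | some i => PySem.List.pySetD linha i kv.2
              | none => linha) (List.replicate comprimento.toNat valorBase) from rfl]
    rw [hget j hj, hlook]
    rw [List.getElem?_map, List.getElem?_range hj]
    cases hg : (PySem.Dict.ofList dicionario).get? (PySem.Int.toStr (j : Int)) with
    | some w => simp [hg]
    | none => simp [hg, hj]
  · have h1 : (geraLinha comprimento dicionario valorBase).length = comprimento.toNat := by
      rw [hA]; simp
    have h2 : (geraLinha_alt comprimento dicionario valorBase).length = comprimento.toNat := by
      exact hlen
    rw [List.getElem?_eq_none (by omega), List.getElem?_eq_none (by omega)]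

-- ===== VERDICT (by name: the statement is the Claim_ definition above) =====
theorem geraLinha_spec : Claim_equal_geraLinha := by
  intro comprimento dicionario valorBase _
  unfold Spec_geraLinha
  exact geraLinha_eq_alt comprimento dicionario valorBase
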